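-- pv_equiv track=rewrite | github.com/algorithm-study-2021/Algorithm_Study_2021 | 김하영/week08.py | solution
-- ===== SOURCE A (Python) =====
-- def solution(people, limit):
--     answer = 0
--     people.sort(reverse=True)
--     while len(people)!=0:
--         if len(people)!=1:
--             if people[0] + people[-1] <= limit:
--                 del people[-1]
--         del people[0]
--         answer += 1
--     return answer
-- ===== SOURCE B (Python) =====
-- def solution(people, limit):
--     # Two-pointer over the ascending-sorted list with indices; no deletions.
--     # Note: A empties `people` in place; B only sorts it in place (return value is the same).
--     people.sort()
--     i, j = 0, len(people) - 1
--     boats = 0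
--     while i <= j:
--         if i < j and people[i] + people[j] <= limit:
--             i += 1
--         j -= 1
--         boats += 1
--     return boats
-- ===== Notes on version B (the rewrite author's own statement) =====
-- stated objective: faster
-- what changed: Replaces the descending sort plus repeated del people[0]/del people[-1] (each deletion O(n)) by an ascending sort and a two-pointer index scan with no list mutation inside the loop.
import Mathlib
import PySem

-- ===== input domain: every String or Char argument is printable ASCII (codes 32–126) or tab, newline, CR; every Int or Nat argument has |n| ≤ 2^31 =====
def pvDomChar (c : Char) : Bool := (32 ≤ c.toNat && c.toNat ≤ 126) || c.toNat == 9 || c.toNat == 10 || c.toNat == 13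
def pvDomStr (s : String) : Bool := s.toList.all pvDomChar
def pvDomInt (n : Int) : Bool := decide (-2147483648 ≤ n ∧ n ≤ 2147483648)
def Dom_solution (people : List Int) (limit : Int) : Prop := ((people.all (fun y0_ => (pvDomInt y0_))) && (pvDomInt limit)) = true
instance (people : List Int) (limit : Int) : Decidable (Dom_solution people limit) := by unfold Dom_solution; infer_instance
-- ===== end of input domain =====

-- B replaces A's descending sort + repeated O(n) deletions by an ascending sort and a
-- two-pointer index scan. Equivalence is about the RETURN value: A empties `people` in
-- place, B only sorts it in place.

-- ===== PORT A =====
-- the while loop of A; people nonempty in the branch, so people[0] / people[-1] are in range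
def solAuxA (limit : Int) (people : List Int) : Int :=
  if _h : people = [] then 0
  else
    -- if len(people)!=1 and people[0]+people[-1] <= limit: del people[-1]
    let people1 :=
      if people.length ≠ 1 ∧
          (PySem.List.pyGet? people 0).getD 0 + (PySem.List.pyGet? people (-1)).getD 0 ≤ limit
      then people.dropLast else people
    -- del people[0]; answer += 1
    solAuxA limit people1.tail + 1
termination_by people.length
decreasing_by
  rcases people with _ | ⟨x, xs⟩
  · exact absurd rfl _h
  · split <;> simp

def solution (people : List Int) (limit : Int) : Int :=
  solAuxA limit (PySem.List.sorted people (fun x => x) true)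

-- ===== PORT B =====
-- the while loop of B; 0 ≤ i ≤ j < len(arr) throughout, so arr[i] / arr[j] are in range
def solAuxB (arr : List Int) (limit : Int) (i j boats : Int) : Int :=
  if _h : i ≤ j then
    let i' := if i < j ∧
        (PySem.List.pyGet? arr i).getD 0 + (PySem.List.pyGet? arr j).getD 0 ≤ limit
      then i + 1 else i
    solAuxB arr limit i' (j - 1) (boats + 1)
  else boats
termination_by (j + 1 - i).toNat
decreasing_by split <;> omega

def solution_alt (people : List Int) (limit : Int) : Int :=
  solAuxB (PySem.List.sorted people (fun x => x) false) limit 0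
    ((PySem.List.sorted people (fun x => x) false).length - 1) 0

-- ===== PRECONDITION & SPEC =====
def Spec_solution (people : List Int) (limit : Int) (out : Int) : Prop := out = solution_alt people limit
instance (people : List Int) (limit : Int) (out : Int) : Decidable (Spec_solution people limit out) := by unfold Spec_solution; infer_instance

-- ===== CLAIM (what is proved, stated in full; the proofs are below) =====
def Claim_equal_solution : Prop := ∀ (people : List Int) (limit : Int), Dom_solution people limit → Spec_solution people limit (solution people limit)

-- ===== LEMMAS AND PROOFS =====

-- sorting descending yields the reverse of sorting ascending (Int values: ties are equal values)
theorem pv_sorted_rev_eq_reverse (xs : List Int) :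
    PySem.List.sorted xs (fun x => x) true = (PySem.List.sorted xs (fun x => x) false).reverse := by
  refine List.Perm.eq_of_pairwise (le := fun a b : Int => b ≤ a)
    (fun a b _ _ h h' => le_antisymm h' h)
    (PySem.List.sorted_pairwise_rev xs (fun x => x))
    ((List.pairwise_reverse).mpr (PySem.List.sorted_pairwise xs (fun x => x)))
    ?_
  exact (PySem.List.sorted_perm xs (fun x => x) true).trans
    ((PySem.List.sorted_perm xs (fun x => x) false).symm.trans (List.reverse_perm _).symm)

-- the two loops, related: B's indices [i..j] track the reversed segment A still holds
theorem pv_loop_eq (arr : List Int) (limit : Int) :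
    ∀ n : ℕ, ∀ i j b : Int, 0 ≤ i → j < (arr.length : Int) → (j + 1 - i).toNat = n →
      solAuxB arr limit i j b = b + solAuxA limit (((arr.drop i.toNat).take n).reverse) := by
  intro n
  induction n using Nat.strong_induction_on with
  | _ n ih =>
    intro i j b hi hj hn
    by_cases hij : i ≤ j
    · -- n ≥ 1, segment nonempty
      have hn1 : 1 ≤ n := by omega
      have hij' : i.toNat + n = j.toNat + 1 := by omega
      have hjlen : j.toNat < arr.length := by omega
      set seg := (arr.drop i.toNat).take n with hseg
      have hslen : seg.length = n := by
        rw [hseg, List.length_take, List.length_drop]; omega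
      have hsne : seg ≠ [] := by
        intro h; rw [h] at hslen; simp at hslen; omega
      -- seg's last element is arr[j], its head is arr[i]
      have hlast : seg.getLast? = some arr[j.toNat] := by
        rw [List.getLast?_eq_getElem?, hslen, hseg, List.getElem?_take, if_pos (by omega),
          List.getElem?_drop,
          show i.toNat + (n - 1) = j.toNat by omega,
          List.getElem?_eq_getElem hjlen]
      have hhead : seg.head? = some arr[i.toNat] := by
        rw [List.head?_eq_getElem?, hseg, List.getElem?_take, if_pos (by omega),
          List.getElem?_drop,
          show i.toNat + 0 = i.toNat by omega,
          List.getElem?_eq_getElem (by omega : i.toNat < arr.length)]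
      -- decompose seg = dropLast ++ [arr[j]]
      have hdecomp : seg = seg.dropLast ++ [arr[j.toNat]] := by
        conv_lhs => rw [← List.dropLast_append_getLast hsne]
        rw [List.getLast?_eq_some_getLast hsne] at hlast
        rw [Option.some.injEq] at hlast
        rw [hlast]
      have hrev : seg.reverse = arr[j.toNat] :: seg.dropLast.reverse := by
        conv_lhs => rw [hdecomp]
        simp
      have hdl : seg.dropLast = (arr.drop i.toNat).take (n - 1) := by
        rw [List.dropLast_eq_take, hslen, hseg, List.take_take]
        congr 1
        omega
      have htail : seg.tail = (arr.drop ((i + 1).toNat)).take (n - 1) := by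
        rw [hseg, ← List.drop_one, List.drop_take, List.drop_drop]
        congr 2
        omega
      -- the four element accesses
      have hA0 : (PySem.List.pyGet? seg.reverse 0).getD 0 = arr[j.toNat] := by
        rw [hrev, PySem.List.pyGet?_zero_cons]; rfl
      have hAm1 : (PySem.List.pyGet? seg.reverse (-1)).getD 0 = arr[i.toNat] := by
        rw [PySem.List.pyGet?_neg_one, List.getLast?_reverse, hhead]; rfl
      have hBi : (PySem.List.pyGet? arr i).getD 0 = arr[i.toNat] := by
        rw [PySem.List.pyGet?_eq_some_getElem arr hi (by omega)]; rfl
      have hBj : (PySem.List.pyGet? arr j).getD 0 = arr[j.toNat] := by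
        rw [PySem.List.pyGet?_eq_some_getElem arr (by omega) hj]; rfl
      have hlen1 : seg.reverse.length ≠ 1 ↔ i < j := by
        rw [List.length_reverse, hslen]; omega
      have hrne : seg.reverse ≠ [] := by simp [hsne]
      -- unfold one step of each loop
      rw [solAuxB, dif_pos hij, solAuxA, dif_neg hrne]
      by_cases hc : i < j ∧ arr[i.toNat] + arr[j.toNat] ≤ limit
      · -- pair: i+1, and A drops both ends
        have hcB : (i < j ∧ (PySem.List.pyGet? arr i).getD 0 + (PySem.List.pyGet? arr j).getD 0 ≤ limit) := by
          rw [hBi, hBj]; exact hc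
        have hcA : seg.reverse.length ≠ 1 ∧
            (PySem.List.pyGet? seg.reverse 0).getD 0 + (PySem.List.pyGet? seg.reverse (-1)).getD 0 ≤ limit := by
          rw [hlen1, hA0, hAm1]
          exact ⟨hc.1, by linarith [hc.2]⟩
        simp only [if_pos hcB, if_pos hcA]
        have htl : seg.reverse.dropLast.tail = ((arr.drop (i + 1).toNat).take (n - 2)).reverse := by
          rw [List.dropLast_reverse, List.tail_reverse]
          congr 1
          rw [htail, List.dropLast_eq_take, List.length_take, List.length_drop, List.take_take]
          congr 1
          omega
        rw [htl]
        rw [ih (n - 2) (by omega) (i + 1) (j - 1) (b + 1) (by omega) (by omega) (by omega)]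
        ring
      · -- no pair: only the heaviest leaves
        have hcB : ¬ (i < j ∧ (PySem.List.pyGet? arr i).getD 0 + (PySem.List.pyGet? arr j).getD 0 ≤ limit) := by
          rw [hBi, hBj]; exact hc
        have hcA : ¬ (seg.reverse.length ≠ 1 ∧
            (PySem.List.pyGet? seg.reverse 0).getD 0 + (PySem.List.pyGet? seg.reverse (-1)).getD 0 ≤ limit) := by
          rw [hlen1, hA0, hAm1]
          intro h
          exact hc ⟨h.1, by linarith [h.2]⟩
        simp only [if_neg hcB, if_neg hcA]
        have htl : seg.reverse.tail = ((arr.drop i.toNat).take (n - 1)).reverse := by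
          rw [List.tail_reverse, hdl]
        rw [htl]
        rw [ih (n - 1) (by omega) i (j - 1) (b + 1) hi (by omega) (by omega)]
        ring
    · -- i > j: both loops stop
      have hn0 : n = 0 := by omega
      rw [solAuxB, dif_neg hij, hn0]
      simp [solAuxA]

theorem pv_main (people : List Int) (limit : Int) :
    solution people limit = solution_alt people limit := by
  unfold solution solution_alt
  rw [pv_sorted_rev_eq_reverse]
  set arr := PySem.List.sorted people (fun x => x) false with harr
  have h := pv_loop_eq arr limit arr.length 0 ((arr.length : Int) - 1) 0
    (by omega) (by omega) (by omega)
  simp only [Int.toNat_zero, List.drop_zero, List.take_length, zero_add] at h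
  exact h.symm

-- ===== VERDICT (by name: the statement is the Claim_ definition above) =====
theorem solution_spec : Claim_equal_solution := by
  intro people limit _
  unfold Spec_solution
  exact pv_main people limit
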